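-- pv_equiv track=rewrite | github.com/cemathey/aoc_2020 | day23/day23.py | grab_destination_cup
-- ===== SOURCE A (Python) =====
-- from typing import Deque, Tuple
--
-- def grab_destination_cup(
--     cups: Tuple[int, ...], current_cup: int, picked_up_cups: Tuple[int, ...]
-- ) -> int:
--     destination_cup: int = current_cup - 1
--
--     smallest: int = min(cups)
--     largest: int = max(cups)
--
--     if destination_cup < smallest:
--         destination_cup = largest
--
--     while destination_cup in picked_up_cups:
--         destination_cup -= 1
--
--         if destination_cup < smallest:
--             destination_cup = largest
--
--     return destination_cup
-- ===== SOURCE B (Python) =====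
-- def grab_destination_cup(cups, current_cup, picked_up_cups):
--     smallest = min(cups)
--     largest = max(cups)
--     picked = set(picked_up_cups)
--
--     def best_at_most(d):
--         # largest value in [smallest, d] not picked; only d itself or a value
--         # directly below a picked one can be that maximum
--         cand = [v for v in [d] + [p - 1 for p in picked_up_cups]
--                 if smallest <= v <= d and v not in picked]
--         return max(cand) if cand else None
--
--     r = best_at_most(current_cup - 1)
--     if r is None:
--         r = best_at_most(largest)
--     return r
-- ===== Notes on version B (the rewrite author's own statement) =====
-- stated objective: alternative
-- what changed: B selects the destination directly as the maximum of a small candidate set (current_cup-1 and the values directly below each picked cup, clamped to [min(cups), bound]), falling back to the same selection bounded by max(cups), instead of A's decrement-test-wrap while loop.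
import Mathlib
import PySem

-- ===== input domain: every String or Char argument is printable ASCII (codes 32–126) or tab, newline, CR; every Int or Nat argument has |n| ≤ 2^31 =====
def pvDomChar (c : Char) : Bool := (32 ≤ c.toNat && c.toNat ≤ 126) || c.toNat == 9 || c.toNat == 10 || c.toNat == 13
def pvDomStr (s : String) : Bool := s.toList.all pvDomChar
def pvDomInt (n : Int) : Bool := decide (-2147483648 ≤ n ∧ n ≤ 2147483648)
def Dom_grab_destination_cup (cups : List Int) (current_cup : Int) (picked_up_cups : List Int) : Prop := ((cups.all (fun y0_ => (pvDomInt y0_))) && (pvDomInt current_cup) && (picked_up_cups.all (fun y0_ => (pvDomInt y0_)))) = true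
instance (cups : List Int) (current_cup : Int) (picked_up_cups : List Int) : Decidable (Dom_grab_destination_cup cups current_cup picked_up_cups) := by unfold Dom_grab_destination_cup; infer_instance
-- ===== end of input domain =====

-- B selects the destination directly as the maximum of a small candidate set
-- (current_cup - 1 and the values directly below picked cups) instead of A's
-- decrement-test-wrap while loop; same value wherever A terminates.

-- ===== PORT A =====
-- one body iteration of A's while loop: dest -= 1; if dest < smallest: dest = largest
def pvNext (smallest largest d : Int) : Int :=
  if d - 1 < smallest then largest else d - 1

-- A's while loop, with fuel (the fuel supplied below is enough whenever the loop terminates)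
def pvLoopA (picked : List Int) (smallest largest : Int) : Nat → Int → Int
  | 0, d => d
  | n + 1, d => if d ∈ picked then pvLoopA picked smallest largest n (pvNext smallest largest d) else d

def grab_destination_cup (cups : List Int) (current_cup : Int) (picked_up_cups : List Int) : Int :=
  let smallest := (PySem.List.min? cups (fun x => x)).getD 0   -- getD dead: Pre_ gives cups ≠ []
  let largest := (PySem.List.max? cups (fun x => x)).getD 0
  let d0 := current_cup - 1
  let d1 := if d0 < smallest then largest else d0
  pvLoopA picked_up_cups smallest largest
    ((d1 - smallest).toNat + (largest - smallest).toNat + 1) d1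

-- ===== PORT B =====
-- Source B's best_at_most: max of the candidate list, None when the list is empty
def pvBest (picked_up_cups : List Int) (smallest d : Int) : Option Int :=
  let picked : PySem.Set Int := PySem.Set.ofList picked_up_cups
  let cand := ([d] ++ picked_up_cups.map (fun p => p - 1)).filter
    (fun v => decide (smallest ≤ v ∧ v ≤ d) && !(PySem.Set.contains picked v))
  PySem.List.max? cand (fun x => x)

def grab_destination_cup_alt (cups : List Int) (current_cup : Int) (picked_up_cups : List Int) : Int :=
  let smallest := (PySem.List.min? cups (fun x => x)).getD 0   -- getD dead: Pre_ gives cups ≠ []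
  let largest := (PySem.List.max? cups (fun x => x)).getD 0
  let r := pvBest picked_up_cups smallest (current_cup - 1)
  let r := match r with
    | none => pvBest picked_up_cups smallest largest
    | some v => some v
  r.getD 0   -- getD dead: under Pre_ a candidate exists

-- ===== PRECONDITION & SPEC =====
-- Pre_ excludes cups = [] (A raises ValueError on min) and the inputs on which every integer the
-- loop can ever visit (those in [min cups, max (max cups) (current_cup - 1)]) is in
-- picked_up_cups: A loops forever there (and B returns no destination either).
def Pre_grab_destination_cup (cups : List Int) (current_cup : Int) (picked_up_cups : List Int) : Prop :=
  cups ≠ [] ∧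
  (((PySem.Set.ofList picked_up_cups).filter
      (fun x => decide ((PySem.List.min? cups (fun y => y)).getD 0 ≤ x ∧
        x ≤ max ((PySem.List.max? cups (fun y => y)).getD 0) (current_cup - 1)))).length : Int) <
    max ((PySem.List.max? cups (fun y => y)).getD 0) (current_cup - 1) -
      (PySem.List.min? cups (fun y => y)).getD 0 + 1
instance (cups : List Int) (current_cup : Int) (picked_up_cups : List Int) : Decidable (Pre_grab_destination_cup cups current_cup picked_up_cups) := by unfold Pre_grab_destination_cup; infer_instance

def pvWitness_grab_destination_cup : List Int × Int × List Int := ([1, 2, 3, 4, 5], 1, [2, 3, 4])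

def Spec_grab_destination_cup (cups : List Int) (current_cup : Int) (picked_up_cups : List Int) (out : Int) : Prop := out = grab_destination_cup_alt cups current_cup picked_up_cups
instance (cups : List Int) (current_cup : Int) (picked_up_cups : List Int) (out : Int) : Decidable (Spec_grab_destination_cup cups current_cup picked_up_cups out) := by unfold Spec_grab_destination_cup; infer_instance

-- ===== CLAIM (what is proved, stated in full; the proofs are below) =====
def Claim_equal_grab_destination_cup : Prop := ∀ (cups : List Int) (current_cup : Int) (picked_up_cups : List Int), Dom_grab_destination_cup cups current_cup picked_up_cups → Pre_grab_destination_cup cups current_cup picked_up_cups → Spec_grab_destination_cup cups current_cup picked_up_cups (grab_destination_cup cups current_cup picked_up_cups)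

-- ===== LEMMAS AND PROOFS =====

-- the list of all not-picked values in [s, e): what A's descending scan effectively searches
def pvF (picked : List Int) (s e : Int) : List Int :=
  (PySem.List.pyRange s e 1).filter (fun v => decide (v ∉ picked))

lemma pvMem_F (picked : List Int) {s e v : Int} (h1 : s ≤ v) (h2 : v < e)
    (h3 : v ∉ picked) : v ∈ pvF picked s e := by
  simp [pvF, List.mem_filter, PySem.List.mem_pyRange_one, h1, h2, h3]

lemma pvBounds_F (picked : List Int) {s e v : Int} (h : v ∈ pvF picked s e) :
    (s ≤ v ∧ v < e) ∧ v ∉ picked := by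
  have h1 := (PySem.List.mem_pyRange_one).mp (List.mem_of_mem_filter h)
  have h2 := List.of_mem_filter h
  simp at h2
  exact ⟨h1, h2⟩

lemma pvMax?_eq (l : List Int) (m : Int) (hm : m ∈ l) (h : ∀ x ∈ l, x ≤ m) :
    PySem.List.max? l (fun x => x) = some m := by
  cases hmx : PySem.List.max? l (fun x => x) with
  | none =>
      have := (PySem.List.max?_eq_none_iff _ _).mp hmx
      subst this
      simp at hm
  | some m' =>
      have hmem : m' ∈ l := PySem.List.max?_mem hmx
      have hmax : ∀ y ∈ l, y ≤ m' := PySem.List.max?_isMax hmx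
      have : m' = m := le_antisymm (h m' hmem) (hmax m hm)
      simp [this]

-- L1: with a not-picked candidate in [s, d], A's loop from d returns the greatest one,
-- the max of the pvF list, provided fuel ≥ d - s.
lemma pvL1 (picked : List Int) (s L : Int) :
    ∀ (n : Nat) (d : Int) (fuel : Nat), s ≤ d → (d - s).toNat = n → n ≤ fuel →
    (∃ v, s ≤ v ∧ v ≤ d ∧ v ∉ picked) →
    pvLoopA picked s L fuel d = (PySem.List.max? (pvF picked s (d + 1)) (fun x => x)).getD 0 := by
  intro n
  induction n with
  | zero =>
      intro d fuel hsd hn _ hex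
      obtain ⟨v, hv1, hv2, hv3⟩ := hex
      have hnp : d ∉ picked := by
        have : v = d := by omega
        exact this ▸ hv3
      have hsplit : pvF picked s (d + 1) = [d] := by
        unfold pvF
        rw [show s = d by omega, PySem.List.pyRange_one_singleton]
        simp [hnp]
      rw [hsplit]
      cases fuel with
      | zero => simp [pvLoopA, PySem.List.max?]
      | succ f => simp [pvLoopA, hnp, PySem.List.max?]
  | succ n ih =>
      intro d fuel hsd hn hfuel hex
      have hds : s < d := by omega
      by_cases hd : d ∈ picked
      · -- step: d picked, recurse at d - 1
        obtain ⟨f, rfl⟩ : ∃ f, fuel = f + 1 := ⟨fuel - 1, by omega⟩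
        have hnext : pvNext s L d = d - 1 := by
          simp [pvNext]; omega
        have hex' : ∃ v, s ≤ v ∧ v ≤ d - 1 ∧ v ∉ picked := by
          obtain ⟨v, hv1, hv2, hv3⟩ := hex
          refine ⟨v, hv1, ?_, hv3⟩
          rcases eq_or_lt_of_le hv2 with h | h
          · subst h; exact absurd hd hv3
          · omega
        have hF : pvF picked s (d + 1) = pvF picked s d := by
          have := PySem.List.pyRange_one_succ_right (a := s) (b := d) (by omega)
          simp [pvF, this, List.filter_append, hd]
        rw [hF]
        have hrec := ih (d - 1) f (by omega) (by omega) (by omega) hex'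
        have : d - 1 + 1 = d := by ring
        rw [this] at hrec
        simp only [pvLoopA, hd, if_true, hnext]
        exact hrec
      · -- d itself is the answer
        obtain ⟨f, rfl⟩ : ∃ f, fuel = f + 1 := ⟨fuel - 1, by omega⟩
        have hF : pvF picked s (d + 1) = pvF picked s d ++ [d] := by
          have := PySem.List.pyRange_one_succ_right (a := s) (b := d) (by omega)
          simp [pvF, this, List.filter_append, hd]
        have hle : ∀ x ∈ pvF picked s d ++ [d], x ≤ d := by
          intro x hx
          rcases List.mem_append.mp hx with h' | h'
          · have := (pvBounds_F picked h').1; omega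
          · simp at h'; omega
        have hdm : d ∈ pvF picked s d ++ [d] := by simp
        simp [pvLoopA, hd, hF, pvMax?_eq _ _ hdm hle]

-- L2: while every value of [s, d] is picked, the loop walks down to s and wraps to L,
-- consuming exactly (d - s) + 1 units of fuel.
lemma pvL2 (picked : List Int) (s L : Int) :
    ∀ (n : Nat) (d : Int) (fuel : Nat), s ≤ d → (d - s).toNat = n → n + 1 ≤ fuel →
    (∀ v, s ≤ v → v ≤ d → v ∈ picked) →
    pvLoopA picked s L fuel d = pvLoopA picked s L (fuel - (n + 1)) L := by
  intro n
  induction n with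
  | zero =>
      intro d fuel hsd hn hfuel hall
      have hd : d = s := by omega
      obtain ⟨f, rfl⟩ : ∃ f, fuel = f + 1 := ⟨fuel - 1, by omega⟩
      have hmem : d ∈ picked := hall d (by omega) le_rfl
      have hnext : pvNext s L d = L := by simp [pvNext]; omega
      simp [pvLoopA, hmem, hnext]
  | succ n ih =>
      intro d fuel hsd hn hfuel hall
      have hds : s < d := by omega
      obtain ⟨f, rfl⟩ : ∃ f, fuel = f + 1 := ⟨fuel - 1, by omega⟩
      have hmem : d ∈ picked := hall d (by omega) le_rfl
      have hnext : pvNext s L d = d - 1 := by simp [pvNext]; omega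
      have hrec := ih (d - 1) f (by omega) (by omega) (by omega)
        (fun v h1 h2 => hall v h1 (by omega))
      simp only [pvLoopA, hmem, if_true, hnext]
      rw [hrec]
      congr 1
      omega

-- L3: B's candidate max IS the max of all not-picked values in [s, d]
lemma pvL3 (picked : List Int) (s d : Int) :
    pvBest picked s d = PySem.List.max? (pvF picked s (d + 1)) (fun x => x) := by
  unfold pvBest
  dsimp only
  set cand := ([d] ++ picked.map (fun p => p - 1)).filter
    (fun v => decide (s ≤ v ∧ v ≤ d) && !(PySem.Set.contains (PySem.Set.ofList picked) v)) with hcand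
  have hcandF : ∀ v ∈ cand, v ∈ pvF picked s (d + 1) := by
    intro v hv
    have h2 := List.of_mem_filter hv
    simp [PySem.Set.contains_eq_listContains, PySem.Set.mem_ofList] at h2
    exact pvMem_F picked h2.1.1 (by omega) h2.2
  cases hmx : PySem.List.max? (pvF picked s (d + 1)) (fun x => x) with
  | none =>
      have hFnil := (PySem.List.max?_eq_none_iff _ _).mp hmx
      have : cand = [] := by
        rw [List.eq_nil_iff_forall_not_mem]
        intro v hv
        have := hcandF v hv
        rw [hFnil] at this
        simp at this
      rw [this]
      rfl
  | some m =>
      have hmem : m ∈ pvF picked s (d + 1) := PySem.List.max?_mem hmx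
      have hmax : ∀ y ∈ pvF picked s (d + 1), y ≤ m := PySem.List.max?_isMax hmx
      obtain ⟨⟨hm1, hm2⟩, hm3⟩ := pvBounds_F picked hmem
      -- m is a candidate: either m = d, or m + 1 is picked (else m + 1 would beat m)
      have hmc : m ∈ [d] ++ picked.map (fun p => p - 1) := by
        rcases eq_or_lt_of_le (show m ≤ d by omega) with h | h
        · simp [h]
        · have hp : m + 1 ∈ picked := by
            by_contra hnp
            have := hmax (m + 1) (pvMem_F picked (by omega) (by omega) hnp)
            omega
          simp only [List.mem_append, List.mem_map]
          exact Or.inr ⟨m + 1, hp, by ring⟩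
      have hmcand : m ∈ cand := by
        rw [hcand]
        apply List.mem_filter.mpr
        refine ⟨hmc, ?_⟩
        simp [PySem.Set.contains_eq_listContains, PySem.Set.mem_ofList, hm3]
        omega
      exact pvMax?_eq cand m hmcand
        (fun y hy => hmax y (hcandF y hy))

-- Pre_'s count bound really yields a not-picked value in [s, M] (pigeonhole)
lemma pvPre_exists (picked : List Int) (s M : Int)
    (h : (((PySem.Set.ofList picked).filter
        (fun x => decide (s ≤ x ∧ x ≤ M))).length : Int) < M - s + 1) :
    ∃ v, s ≤ v ∧ v ≤ M ∧ v ∉ picked := by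
  by_contra hno
  push Not at hno
  have hsub : PySem.List.pyRange s (M + 1) 1 ⊆
      (PySem.Set.ofList picked).filter (fun x => decide (s ≤ x ∧ x ≤ M)) := by
    intro v hv
    have hb := (PySem.List.mem_pyRange_one).mp hv
    have hp : v ∈ picked := hno v hb.1 (by omega)
    apply List.mem_filter.mpr
    refine ⟨(PySem.Set.mem_ofList _ _).mpr hp, ?_⟩
    simp
    omega
  have hnd := PySem.List.nodup_pyRange_one (a := s) (b := M + 1)
  have hlen := (List.subperm_of_subset hnd hsub).length_le
  rw [PySem.List.length_pyRange_one] at hlen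
  omega

-- ===== VERDICT (by name: the statement is the Claim_ definition above) =====
theorem grab_destination_cup_spec : Claim_equal_grab_destination_cup := by
  intro cups current_cup picked hdom hpre
  obtain ⟨hne, hcnt⟩ := hpre
  unfold Spec_grab_destination_cup grab_destination_cup grab_destination_cup_alt
  dsimp only
  rw [pvL3, pvL3]
  set s := (PySem.List.min? cups (fun x => x)).getD 0 with hs
  set L := (PySem.List.max? cups (fun x => x)).getD 0 with hL
  -- s ≤ L since cups ≠ []
  have hsL : s ≤ L := by
    cases hmin : PySem.List.min? cups (fun x => x) with
    | none => exact absurd ((PySem.List.min?_eq_none_iff _ _).mp hmin) hne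
    | some m =>
      cases hmax : PySem.List.max? cups (fun x => x) with
      | none => exact absurd ((PySem.List.max?_eq_none_iff _ _).mp hmax) hne
      | some M =>
        have hmmem : m ∈ cups := PySem.List.min?_mem hmin
        have := PySem.List.max?_isMax hmax m hmmem
        simp [hs, hL, hmin, hmax]
        exact this
  clear_value s L
  obtain ⟨v, hv1, hv2, hvnp⟩ := pvPre_exists picked s (max L (current_cup - 1)) hcnt
  rw [show current_cup - 1 + 1 = current_cup by ring]
  by_cases hcc : current_cup - 1 < s
  · -- destination starts at largest; B's first call finds nothing (empty interval)
    rw [if_pos hcc]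
    have hvL : v ≤ L := by omega
    have hA := pvL1 picked s L ((L - s).toNat) L
      ((L - s).toNat + (L - s).toNat + 1) hsL rfl (by omega) ⟨v, hv1, hvL, hvnp⟩
    rw [hA]
    have hbelow : pvF picked s current_cup = [] := by
      unfold pvF
      rw [PySem.List.pyRange_one_eq_nil (by omega)]
      rfl
    rw [hbelow]
    simp [PySem.List.max?]
  · -- destination starts at current_cup - 1
    rw [if_neg hcc]
    by_cases hex : ∃ u, s ≤ u ∧ u ≤ current_cup - 1 ∧ u ∉ picked
    · -- the answer lies below current_cup: B's first call finds it
      have hA := pvL1 picked s L ((current_cup - 1 - s).toNat) (current_cup - 1)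
        ((current_cup - 1 - s).toNat + (L - s).toNat + 1) (by omega) rfl (by omega) hex
      rw [hA, show current_cup - 1 + 1 = current_cup by ring]
      obtain ⟨u, hu1, hu2, hu3⟩ := hex
      have hu4 : u < current_cup := by omega
      have hmem := pvMem_F picked hu1 hu4 hu3
      cases hmx : PySem.List.max? (pvF picked s current_cup) (fun x => x) with
      | none =>
          rw [(PySem.List.max?_eq_none_iff _ _).mp hmx] at hmem
          simp at hmem
      | some m => rfl
    · -- everything below current_cup is picked: loop wraps to L; B's first call is empty
      push Not at hex
      have hall : ∀ u, s ≤ u → u ≤ current_cup - 1 → u ∈ picked := by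
        intro u h1 h2
        by_contra h
        exact h (hex u h1 h2)
      have hvL : v ≤ L := by
        have : ¬ (v ≤ current_cup - 1) := fun h => hvnp (hall v hv1 h)
        omega
      have hA2 := pvL2 picked s L ((current_cup - 1 - s).toNat) (current_cup - 1)
        ((current_cup - 1 - s).toNat + (L - s).toNat + 1) (by omega) rfl (by omega) hall
      have hA1 := pvL1 picked s L ((L - s).toNat) L ((L - s).toNat) hsL rfl le_rfl
        ⟨v, hv1, hvL, hvnp⟩
      have hbelow : pvF picked s current_cup = [] := by
        rw [List.eq_nil_iff_forall_not_mem]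
        intro u hu
        obtain ⟨⟨h1, h2⟩, h3⟩ := pvBounds_F picked hu
        exact h3 (hall u h1 (by omega))
      rw [hA2, show (current_cup - 1 - s).toNat + (L - s).toNat + 1 -
        ((current_cup - 1 - s).toNat + 1) = (L - s).toNat by omega, hA1, hbelow]
      simp [PySem.List.max?]
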